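-- pv_equiv track=rewrite | github.com/Gendo90/HackerRank | HackerRank Cert/parliamentElections.py | parliamentParties
-- ===== SOURCE A (Python) =====
-- def parliamentParties(votes):
--     numVotes = len(votes)
--     cutOffVoteNum, r = divmod(numVotes, 20)
--     if(r>0):
--         cutOffVoteNum+=1
--     partyMap = {}
--     validParties = []
--
--     #populate partyMap
--     for vote in votes:
--         if(vote in partyMap):
--             partyMap[vote]+=1
--         else:
--             partyMap[vote]=1
--
--     #find validParties
--     for party in partyMap.keys():
--         if(partyMap[party]>=cutOffVoteNum):
--             validParties.append(party)
--
--     validParties.sort()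
--
--     return validParties
-- ===== SOURCE B (Python) =====
-- def parliamentParties(votes):
--     cutOffVoteNum = (len(votes) + 19) // 20
--     sortedVotes = sorted(votes)
--     validParties = []
--     n = len(sortedVotes)
--     i = 0
--     while i < n:
--         j = i + 1
--         while j < n and sortedVotes[j] == sortedVotes[i]:
--             j += 1
--         if j - i >= cutOffVoteNum:
--             validParties.append(sortedVotes[i])
--         i = j
--     return validParties
-- ===== Notes on version B (the rewrite author's own statement) =====
-- stated objective: idiomatic
-- what changed: A tallies votes in a dict, filters the keys and sorts them at the end; B sorts the vote list first and does one run-length sweep over it, emitting each party whose run reaches the cutoff, so the output is already in order and no dict or final sort is needed.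
import Mathlib
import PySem

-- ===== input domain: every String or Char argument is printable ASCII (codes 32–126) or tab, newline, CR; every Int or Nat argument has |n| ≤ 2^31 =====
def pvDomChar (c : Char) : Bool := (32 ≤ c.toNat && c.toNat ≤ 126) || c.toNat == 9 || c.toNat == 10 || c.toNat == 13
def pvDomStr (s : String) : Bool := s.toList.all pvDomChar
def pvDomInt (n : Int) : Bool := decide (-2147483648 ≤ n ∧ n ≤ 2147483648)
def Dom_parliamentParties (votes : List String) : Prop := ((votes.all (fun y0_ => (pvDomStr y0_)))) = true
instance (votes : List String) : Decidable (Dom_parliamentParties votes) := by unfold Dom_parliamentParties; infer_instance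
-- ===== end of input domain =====

-- B replaces A's dict-tally-then-sort-keys by sort-first-then-run-length-group (idiomatic single sorted sweep, no final sort of the keys).

-- ===== PORT A =====
def parliamentParties (votes : List String) : List String :=
  let numVotes : Int := (votes.length : Int)
  let cutOffVoteNum0 : Int := PySem.Int.floordiv numVotes 20
  let r : Int := PySem.Int.mod numVotes 20
  let cutOffVoteNum : Int := if r > 0 then cutOffVoteNum0 + 1 else cutOffVoteNum0
  let partyMap : PySem.Dict String Int :=
    votes.foldl (fun d vote =>
      if d.contains vote then d.modify vote 0 (· + 1) else d.insert vote 1) PySem.Dict.empty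
  let validParties : List String :=
    partyMap.keys.foldl (fun acc party =>
      if partyMap.getD party 0 ≥ cutOffVoteNum then acc ++ [party] else acc) []
  PySem.List.sorted validParties (fun x => x) false

-- ===== PORT B =====
-- run-length sweep over the already-sorted vote list (B's inner while j-scan = takeWhile run; the jump i := j = recursing on the dropWhile suffix)
def pvAltLoop (cutOffVoteNum : Int) (sortedVotes : List String) : List String :=
  match sortedVotes with
  | [] => []
  | party :: rest =>
    let run : Int := 1 + ((rest.takeWhile (· == party)).length : Int)
    if run ≥ cutOffVoteNum then
      party :: pvAltLoop cutOffVoteNum (rest.dropWhile (· == party))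
    else
      pvAltLoop cutOffVoteNum (rest.dropWhile (· == party))
termination_by sortedVotes.length
decreasing_by
  all_goals
    simp only [List.length_cons]
    exact Nat.lt_succ_of_le (List.Sublist.length_le (List.dropWhile_sublist _))

def parliamentParties_alt (votes : List String) : List String :=
  let cutOffVoteNum : Int := PySem.Int.floordiv ((votes.length : Int) + 19) 20
  pvAltLoop cutOffVoteNum (PySem.List.sorted votes (fun x => x) false)

-- ===== PRECONDITION & SPEC =====
def Spec_parliamentParties (votes : List String) (out : List String) : Prop := out = parliamentParties_alt votes
instance (votes : List String) (out : List String) : Decidable (Spec_parliamentParties votes out) := by unfold Spec_parliamentParties; infer_instance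

-- ===== CLAIM (what is proved, stated in full; the proofs are below) =====
def Claim_equal_parliamentParties : Prop := ∀ (votes : List String), Dom_parliamentParties votes → Spec_parliamentParties votes (parliamentParties votes)

-- ===== LEMMAS AND PROOFS =====
theorem lt_of_mem_dropWhile (x y : String) (rest : List String)
    (hs : (x :: rest).Pairwise (· ≤ ·)) (hy : y ∈ rest.dropWhile (· == x)) : x < y := by
  have hle : x ≤ y := (List.pairwise_cons.mp hs).1 y (List.dropWhile_sublist _ |>.mem hy)
  rcases hz : rest.dropWhile (· == x) with _ | ⟨z, t⟩
  · simp [hz] at hy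
  · have hzx : ¬ (z == x) = true := by
      have := List.head?_dropWhile_not (p := (· == x)) (l := rest)
      rw [hz] at this; simpa using this
    have hzmem : z ∈ rest := (List.dropWhile_sublist _).mem (hz ▸ List.mem_cons_self)
    have hxz : x ≤ z := (List.pairwise_cons.mp hs).1 z hzmem
    have hzy : z ≤ y := by
      rw [hz] at hy
      rcases List.mem_cons.mp hy with h | h
      · exact le_of_eq h.symm
      · have hp : (z :: t).Pairwise (· ≤ ·) := by
          rw [← hz]
          exact ((List.pairwise_cons.mp hs).2).sublist (List.dropWhile_sublist _)
        exact (List.pairwise_cons.mp hp).1 y h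
    refine lt_of_le_of_ne hle ?_
    intro he
    exact hzx (by simp [le_antisymm (hzy.trans he.symm.le) hxz])

theorem count_head (x : String) (rest : List String) :
    (x :: rest).count x = 1 + (rest.takeWhile (· == x)).length + (rest.dropWhile (· == x)).count x := by
  conv_lhs => rw [← List.takeWhile_append_dropWhile (p := (· == x)) (l := rest)]
  rw [List.count_cons, List.count_append]
  have h : (rest.takeWhile (· == x)).count x = (rest.takeWhile (· == x)).length := by
    rw [List.count_eq_length]
    intro b hb
    exact (eq_of_beq (List.mem_takeWhile_imp (p := (· == x)) hb)).symm
  simp only [h, beq_self_eq_true, if_true]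
  omega

theorem count_tail (x y : String) (rest : List String) (hxy : x < y) :
    (x :: rest).count y = (rest.dropWhile (· == x)).count y := by
  conv_lhs => rw [← List.takeWhile_append_dropWhile (p := (· == x)) (l := rest)]
  rw [List.count_cons, List.count_append]
  have h : (rest.takeWhile (· == x)).count y = 0 := by
    rw [List.count_eq_zero]
    intro hmem
    exact ne_of_gt hxy (eq_of_beq (List.mem_takeWhile_imp (p := (· == x)) hmem))
  have h2 : ¬ (x == y) = true := by simpa using (ne_of_lt hxy)
  simp [h, h2]

theorem count_head_zero_tail (x : String) (rest : List String)
    (hs : (x :: rest).Pairwise (· ≤ ·)) : (rest.dropWhile (· == x)).count x = 0 := by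
  rw [List.count_eq_zero]
  intro hmem
  exact lt_irrefl x (lt_of_mem_dropWhile x x rest hs hmem)

theorem pairwise_tail (x : String) (rest : List String)
    (hs : (x :: rest).Pairwise (· ≤ ·)) : (rest.dropWhile (· == x)).Pairwise (· ≤ ·) :=
  ((List.pairwise_cons.mp hs).2).sublist (List.dropWhile_sublist _)

theorem pvAltLoop_mem (c : Int) (l : List String) (hs : l.Pairwise (· ≤ ·)) (y : String) :
    y ∈ pvAltLoop c l ↔ (y ∈ l ∧ c ≤ (l.count y : Int)) := by
  induction l using pvAltLoop.induct c with
  | case1 => simp [pvAltLoop]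
  | case2 x rest run hrun ih =>
    have hs' := pairwise_tail x rest hs
    have hrun' : 1 + (((rest.takeWhile (· == x)).length : Nat) : Int) ≥ c := hrun
    rw [pvAltLoop]
    rw [if_pos hrun']
    simp only [List.mem_cons]
    constructor
    · rintro (rfl | hy)
      · refine ⟨Or.inl rfl, ?_⟩
        rw [count_head, count_head_zero_tail _ rest hs]
        push_cast
        omega
      · have h1 := (ih hs').mp hy
        have hlt := lt_of_mem_dropWhile x y rest hs h1.1
        refine ⟨Or.inr ((List.dropWhile_sublist _).mem h1.1), ?_⟩
        rw [count_tail x y rest hlt]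
        exact h1.2
    · rintro ⟨hy, hc⟩
      rcases hy with rfl | hy
      · exact Or.inl rfl
      · by_cases hyx : y = x
        · exact Or.inl hyx
        · have hysplit : y ∈ rest.takeWhile (· == x) ∨ y ∈ rest.dropWhile (· == x) := by
            rw [← List.takeWhile_append_dropWhile (p := (· == x)) (l := rest)] at hy
            exact List.mem_append.mp hy
          rcases hysplit with h | h
          · exact absurd (eq_of_beq (List.mem_takeWhile_imp (p := (· == x)) h)) hyx
          · have hlt := lt_of_mem_dropWhile x y rest hs h
            exact Or.inr ((ih hs').mpr ⟨h, by rw [← count_tail x y rest hlt]; exact hc⟩)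
  | case3 x rest run hrun ih =>
    have hs' := pairwise_tail x rest hs
    have hrun' : ¬ (1 + (((rest.takeWhile (· == x)).length : Nat) : Int) ≥ c) := hrun
    rw [pvAltLoop]
    rw [if_neg hrun']
    rw [ih hs']
    constructor
    · rintro ⟨hy, hc⟩
      have hlt := lt_of_mem_dropWhile x y rest hs hy
      exact ⟨List.mem_cons.mpr (Or.inr ((List.dropWhile_sublist _).mem hy)),
        by rw [count_tail x y rest hlt]; exact hc⟩
    · rintro ⟨hy, hc⟩
      rcases List.mem_cons.mp hy with rfl | hy
      · exfalso
        rw [count_head, count_head_zero_tail _ rest hs] at hc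
        push_cast at hc
        omega
      · by_cases hyx : y = x
        · subst hyx
          exfalso
          rw [count_head, count_head_zero_tail _ rest hs] at hc
          push_cast at hc
          omega
        · have hysplit : y ∈ rest.takeWhile (· == x) ∨ y ∈ rest.dropWhile (· == x) := by
            rw [← List.takeWhile_append_dropWhile (p := (· == x)) (l := rest)] at hy
            exact List.mem_append.mp hy
          rcases hysplit with h | h
          · exact absurd (eq_of_beq (List.mem_takeWhile_imp (p := (· == x)) h)) hyx
          · have hlt := lt_of_mem_dropWhile x y rest hs h
            exact ⟨h, by rw [← count_tail x y rest hlt]; exact hc⟩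

theorem pvAltLoop_pairwise (c : Int) (l : List String) (hs : l.Pairwise (· ≤ ·)) :
    (pvAltLoop c l).Pairwise (· < ·) := by
  induction l using pvAltLoop.induct c with
  | case1 => simp [pvAltLoop]
  | case2 x rest run hrun ih =>
    have hs' := pairwise_tail x rest hs
    have hrun' : 1 + (((rest.takeWhile (· == x)).length : Nat) : Int) ≥ c := hrun
    rw [pvAltLoop, if_pos hrun']
    rw [List.pairwise_cons]
    refine ⟨?_, ih hs'⟩
    intro y hy
    have h1 := (pvAltLoop_mem c _ hs' y).mp hy
    exact lt_of_mem_dropWhile x y rest hs h1.1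
  | case3 x rest run hrun ih =>
    have hs' := pairwise_tail x rest hs
    have hrun' : ¬ (1 + (((rest.takeWhile (· == x)).length : Nat) : Int) ≥ c) := hrun
    rw [pvAltLoop, if_neg hrun']
    exact ih hs'

theorem sorted_filter_eq_altLoop (c : Int) (votes : List String) :
    PySem.List.sorted ((PySem.Set.ofList votes).filter (fun y => decide ((votes.count y : Int) ≥ c)))
      (fun x => x) false
    = pvAltLoop c (PySem.List.sorted votes (fun x => x) false) := by
  have hsv : (PySem.List.sorted votes (fun x => x) false).Pairwise (· ≤ ·) := by
    simpa using PySem.List.sorted_pairwise votes (fun x => x)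
  apply PySem.List.sorted_eq_of_perm_of_pairwise_lt
  · rw [List.perm_ext_iff_of_nodup]
    · intro y
      rw [pvAltLoop_mem c _ hsv y, List.mem_filter]
      have hm : y ∈ PySem.List.sorted votes (fun x => x) false ↔ y ∈ votes := PySem.List.mem_sorted votes (fun x => x) false y
      have hcnt : (PySem.List.sorted votes (fun x => x) false).count y = votes.count y :=
        (PySem.List.sorted_perm votes (fun x => x) false).count_eq y
      rw [hm, hcnt, PySem.Set.mem_ofList]
      simp [ge_iff_le]
    · exact (pvAltLoop_pairwise c _ hsv).imp (fun h => ne_of_lt h)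
    · exact (PySem.Set.nodup_ofList votes).filter _
  · exact pvAltLoop_pairwise c _ hsv

theorem cutoff_eq (n : Nat) :
    PySem.Int.floordiv ((n : Int) + 19) 20 =
      (if PySem.Int.mod (n : Int) 20 > 0 then PySem.Int.floordiv (n : Int) 20 + 1
       else PySem.Int.floordiv (n : Int) 20) := by
  simp [PySem.Int.floordiv, PySem.Int.mod, Int.fdiv_eq_ediv, Int.fmod_eq_emod]
  omega

theorem fold_eq_counter (votes : List String) :
    votes.foldl (fun d vote =>
      if d.contains vote then d.modify vote 0 (· + 1) else d.insert vote 1) PySem.Dict.empty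
    = PySem.Dict.counter votes := by
  rw [PySem.Dict.counter_eq_foldl]
  congr 1
  funext d v
  by_cases h : d.contains v
  · simp [h]
  · simp only [h, Bool.false_eq_true, if_false]
    simp [PySem.Dict.modify, PySem.Dict.getD_of_not_contains, h]

theorem valid_eq (votes : List String) (c : Int) :
    (PySem.Dict.counter votes).keys.foldl (fun acc party =>
      if (PySem.Dict.counter votes).getD party 0 ≥ c then acc ++ [party] else acc) []
    = (PySem.Set.ofList votes).filter (fun y => decide ((votes.count y : Int) ≥ c)) := by
  have h1 : (fun (acc : List String) party =>
      if (PySem.Dict.counter votes).getD party 0 ≥ c then acc ++ [party] else acc)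
      = (fun acc party =>
      if (fun y => decide ((PySem.Dict.counter votes).getD y 0 ≥ c)) party = true then acc ++ [party] else acc) := by
    funext acc party
    simp
  rw [h1, PySem.List.foldl_append_if, PySem.Dict.keys_counter]
  simp [PySem.Dict.getD_counter]

-- ===== VERDICT (by name: the statement is the Claim_ definition above) =====
theorem parliamentParties_spec : Claim_equal_parliamentParties := by
  intro votes _
  unfold Spec_parliamentParties
  simp only [parliamentParties, parliamentParties_alt]
  rw [fold_eq_counter, valid_eq, cutoff_eq, sorted_filter_eq_altLoop]
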